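-- pv_equiv track=rewrite | github.com/syarasyoujyu/NVIDIA-Nemotron | scripts/extraction/patterns/text_decryption/validator.py | consistent_substitution
-- ===== SOURCE A (Python) =====
-- def consistent_substitution(pairs: list[tuple[str, str]]) -> bool:
--     cipher_to_plain: dict[str, str] = {}
--     plain_to_cipher: dict[str, str] = {}
--
--     for cipher_text, plain_text in pairs:
--         cipher_words = cipher_text.split()
--         plain_words = plain_text.split()
--         if len(cipher_words) != len(plain_words):
--             return False
--
--         for cipher_word, plain_word in zip(cipher_words, plain_words):
--             if len(cipher_word) != len(plain_word):
--                 return False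
--             for cipher_char, plain_char in zip(cipher_word, plain_word):
--                 prev_plain = cipher_to_plain.get(cipher_char)
--                 if prev_plain is not None and prev_plain != plain_char:
--                     return False
--                 cipher_to_plain[cipher_char] = plain_char
--
--                 prev_cipher = plain_to_cipher.get(plain_char)
--                 if prev_cipher is not None and prev_cipher != cipher_char:
--                     return False
--                 plain_to_cipher[plain_char] = cipher_char
--     return True
-- ===== SOURCE B (Python) =====
-- def consistent_substitution(pairs: list[tuple[str, str]]) -> bool:
--     corr: set[tuple[str, str]] = set()
--     for cipher_text, plain_text in pairs:
--         cipher_words = cipher_text.split()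
--         plain_words = plain_text.split()
--         if len(cipher_words) != len(plain_words):
--             return False
--         for cipher_word, plain_word in zip(cipher_words, plain_words):
--             if len(cipher_word) != len(plain_word):
--                 return False
--             for cipher_char, plain_char in zip(cipher_word, plain_word):
--                 corr.add((cipher_char, plain_char))
--     return len(corr) == len({c for c, _ in corr}) == len({p for _, p in corr})
-- ===== Notes on version B (the rewrite author's own statement) =====
-- stated objective: alternative
-- what changed: Replaces A's interleaved forward/backward dictionary conflict checks inside the innermost char loop with a single collect pass into a set of (cipher, plain) pairs followed by one final cardinality check that the pair set is a bijection.
import Mathlib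
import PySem

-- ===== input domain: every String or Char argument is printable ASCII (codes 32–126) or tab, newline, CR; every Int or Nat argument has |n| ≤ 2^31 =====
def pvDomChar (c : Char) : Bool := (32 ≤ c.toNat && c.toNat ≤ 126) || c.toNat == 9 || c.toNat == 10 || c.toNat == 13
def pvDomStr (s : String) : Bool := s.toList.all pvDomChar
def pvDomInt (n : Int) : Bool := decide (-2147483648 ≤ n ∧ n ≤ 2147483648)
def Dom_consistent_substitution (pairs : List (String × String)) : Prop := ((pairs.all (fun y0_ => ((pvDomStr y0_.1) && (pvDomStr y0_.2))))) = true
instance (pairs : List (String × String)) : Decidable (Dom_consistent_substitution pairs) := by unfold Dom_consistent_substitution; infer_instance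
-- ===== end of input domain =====

-- B replaces A's interleaved two-dictionary conflict checks with a collect-into-a-set pass
-- followed by one final cardinality (bijection) check; same asymptotic cost (objective: alternative).

-- ===== PORT A =====
-- inner char loop of A: the two dict lookups/updates with early return (none = Python's `return False`)
def pvAChars : List (Char × Char) → PySem.Dict Char Char → PySem.Dict Char Char →
    Option (PySem.Dict Char Char × PySem.Dict Char Char)
  | [], d1, d2 => some (d1, d2)
  | (c, p) :: rest, d1, d2 =>
    let prevPlain := d1.get? c
    if prevPlain.isSome ∧ prevPlain ≠ some p then none
    else
      let d1' := d1.insert c p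
      let prevCipher := d2.get? p
      if prevCipher.isSome ∧ prevCipher ≠ some c then none
      else pvAChars rest d1' (d2.insert p c)

-- word loop of A: per-word length check, then the char loop
def pvAWords : List (List Char × List Char) → PySem.Dict Char Char → PySem.Dict Char Char →
    Option (PySem.Dict Char Char × PySem.Dict Char Char)
  | [], d1, d2 => some (d1, d2)
  | (cw, pw) :: rest, d1, d2 =>
    if cw.length ≠ pw.length then none
    else
      match pvAChars (cw.zip pw) d1 d2 with
      | none => none
      | some (d1', d2') => pvAWords rest d1' d2'

-- outer pair loop of A: split both texts, word-count check, then the word loop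
def pvAPairs : List (String × String) → PySem.Dict Char Char → PySem.Dict Char Char → Bool
  | [], _, _ => true
  | (ct, pt) :: rest, d1, d2 =>
    let cws := PySem.Chars.split₀ ct.toList
    let pws := PySem.Chars.split₀ pt.toList
    if cws.length ≠ pws.length then false
    else
      match pvAWords (cws.zip pws) d1 d2 with
      | none => false
      | some (d1', d2') => pvAPairs rest d1' d2'

def consistent_substitution (pairs : List (String × String)) : Bool :=
  pvAPairs pairs PySem.Dict.empty PySem.Dict.empty

-- ===== PORT B =====
-- inner char loop of B: just add every (cipher_char, plain_char) pair to the set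
def pvBChars (corr : PySem.Set (Char × Char)) (cps : List (Char × Char)) : PySem.Set (Char × Char) :=
  cps.foldl PySem.Set.add corr

def pvBWords : List (List Char × List Char) → PySem.Set (Char × Char) → Option (PySem.Set (Char × Char))
  | [], corr => some corr
  | (cw, pw) :: rest, corr =>
    if cw.length ≠ pw.length then none
    else pvBWords rest (pvBChars corr (cw.zip pw))

def pvBPairs : List (String × String) → PySem.Set (Char × Char) → Option (PySem.Set (Char × Char))
  | [], corr => some corr
  | (ct, pt) :: rest, corr =>
    let cws := PySem.Chars.split₀ ct.toList
    let pws := PySem.Chars.split₀ pt.toList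
    if cws.length ≠ pws.length then none
    else
      match pvBWords (cws.zip pws) corr with
      | none => none
      | some corr' => pvBPairs rest corr'

def consistent_substitution_alt (pairs : List (String × String)) : Bool :=
  match pvBPairs pairs PySem.Set.empty with
  | none => false
  | some corr =>
    let nF := PySem.Set.len (PySem.Set.ofList (corr.map Prod.fst))
    let nS := PySem.Set.len (PySem.Set.ofList (corr.map Prod.snd))
    PySem.Set.len corr == nF && nF == nS

-- ===== PRECONDITION & SPEC =====
def Spec_consistent_substitution (pairs : List (String × String)) (out : Bool) : Prop := out = consistent_substitution_alt pairs
instance (pairs : List (String × String)) (out : Bool) : Decidable (Spec_consistent_substitution pairs out) := by unfold Spec_consistent_substitution; infer_instance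

-- ===== CLAIM (what is proved, stated in full; the proofs are below) =====
def Claim_equal_consistent_substitution : Prop := ∀ (pairs : List (String × String)), Dom_consistent_substitution pairs → Spec_consistent_substitution pairs (consistent_substitution pairs)

-- ===== LEMMAS AND PROOFS =====

-- A's dictionary pair (d1, d2) represents exactly the set s of correspondences seen so far
def pvInv (d1 d2 : PySem.Dict Char Char) (s : List (Char × Char)) : Prop :=
  (∀ c p, d1.get? c = some p ↔ (c, p) ∈ s) ∧ (∀ c p, d2.get? p = some c ↔ (c, p) ∈ s)

-- the pair set is not a bijection
def pvConflict (s : List (Char × Char)) : Prop :=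
  (∃ c p q, p ≠ q ∧ (c, p) ∈ s ∧ (c, q) ∈ s) ∨ (∃ p c d, c ≠ d ∧ (c, p) ∈ s ∧ (d, p) ∈ s)

theorem pvConflict_mono {s t : List (Char × Char)} (hsub : ∀ x ∈ s, x ∈ t) :
    pvConflict s → pvConflict t := by
  rintro (⟨c, p, q, hpq, h1, h2⟩ | ⟨p, c, d, hcd, h1, h2⟩)
  · exact Or.inl ⟨c, p, q, hpq, hsub _ h1, hsub _ h2⟩
  · exact Or.inr ⟨p, c, d, hcd, hsub _ h1, hsub _ h2⟩

theorem pvInv_not_conflict {d1 d2 : PySem.Dict Char Char} {s : List (Char × Char)}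
    (h : pvInv d1 d2 s) : ¬ pvConflict s := by
  rintro (⟨c, p, q, hpq, h1, h2⟩ | ⟨p, c, d, hcd, h1, h2⟩)
  · exact hpq (Option.some.inj (((h.1 c p).mpr h1).symm.trans ((h.1 c q).mpr h2)))
  · exact hcd (Option.some.inj (((h.2 c p).mpr h1).symm.trans ((h.2 d p).mpr h2)))

theorem mem_pvBChars (corr : PySem.Set (Char × Char)) (cps : List (Char × Char)) (x : Char × Char) :
    x ∈ pvBChars corr cps ↔ x ∈ corr ∨ x ∈ cps := by
  induction cps generalizing corr with
  | nil => simp [pvBChars]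
  | cons y rest ih =>
    simp only [pvBChars, List.foldl_cons] at *
    rw [ih]
    simp [PySem.Set.mem_add, or_assoc, List.mem_cons]

theorem nodup_pvBChars (corr : PySem.Set (Char × Char)) (cps : List (Char × Char))
    (h : corr.Nodup) : (pvBChars corr cps).Nodup := by
  induction cps generalizing corr with
  | nil => exact h
  | cons y rest ih => exact ih _ (PySem.Set.nodup_add corr y h)

theorem pvBWords_subset {ws : List (List Char × List Char)} {corr s : PySem.Set (Char × Char)}
    (h : pvBWords ws corr = some s) : ∀ x ∈ corr, x ∈ s := by
  induction ws generalizing corr with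
  | nil => simp [pvBWords] at h; subst h; exact fun x hx => hx
  | cons w rest ih =>
    obtain ⟨cw, pw⟩ := w
    simp only [pvBWords] at h
    split at h
    · exact absurd h (by simp)
    · exact fun x hx => ih h x ((mem_pvBChars _ _ _).mpr (Or.inl hx))

theorem pvBWords_nodup {ws : List (List Char × List Char)} {corr s : PySem.Set (Char × Char)}
    (h : pvBWords ws corr = some s) (hn : corr.Nodup) : s.Nodup := by
  induction ws generalizing corr with
  | nil => simp [pvBWords] at h; subst h; exact hn
  | cons w rest ih =>
    obtain ⟨cw, pw⟩ := w
    simp only [pvBWords] at h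
    split at h
    · exact absurd h (by simp)
    · exact ih h (nodup_pvBChars _ _ hn)

theorem pvBPairs_subset {ps : List (String × String)} {corr s : PySem.Set (Char × Char)}
    (h : pvBPairs ps corr = some s) : ∀ x ∈ corr, x ∈ s := by
  induction ps generalizing corr with
  | nil => simp [pvBPairs] at h; subst h; exact fun x hx => hx
  | cons q rest ih =>
    obtain ⟨ct, pt⟩ := q
    simp only [pvBPairs] at h
    split at h
    · exact absurd h (by simp)
    · split at h
      · exact absurd h (by simp)
      · next corr' heq =>
        exact fun x hx => ih h x (pvBWords_subset heq x hx)

theorem pvBPairs_nodup {ps : List (String × String)} {corr s : PySem.Set (Char × Char)}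
    (h : pvBPairs ps corr = some s) (hn : corr.Nodup) : s.Nodup := by
  induction ps generalizing corr with
  | nil => simp [pvBPairs] at h; subst h; exact hn
  | cons q rest ih =>
    obtain ⟨ct, pt⟩ := q
    simp only [pvBPairs] at h
    split at h
    · exact absurd h (by simp)
    · split at h
      · exact absurd h (by simp)
      · next corr' heq => exact ih h (pvBWords_nodup heq hn)

-- the char-level simulation: A's inner loop succeeds iff the added pairs keep the set conflict-free
theorem pvAChars_sim (cps : List (Char × Char)) :
    ∀ d1 d2 corr, pvInv d1 d2 corr →
      (∀ r, pvAChars cps d1 d2 = some r → pvInv r.1 r.2 (pvBChars corr cps)) ∧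
      (pvAChars cps d1 d2 = none → pvConflict (pvBChars corr cps)) := by
  induction cps with
  | nil =>
    intro d1 d2 corr hinv
    refine ⟨fun r hr => ?_, fun hr => by simp [pvAChars] at hr⟩
    simp [pvAChars] at hr
    simpa [pvBChars, ← hr] using hinv
  | cons x rest ih =>
    obtain ⟨c, p⟩ := x
    intro d1 d2 corr hinv
    have hb : pvBChars corr ((c, p) :: rest) = pvBChars (PySem.Set.add corr (c, p)) rest := rfl
    simp only [pvAChars]
    by_cases h1 : (d1.get? c).isSome ∧ d1.get? c ≠ some p
    · -- A fails on the forward map: two pairs with the same cipher char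
      obtain ⟨hs, hne⟩ := h1
      obtain ⟨q, hq⟩ := Option.isSome_iff_exists.mp hs
      have hq_mem : (c, q) ∈ corr := (hinv.1 c q).mp hq
      have hqp : q ≠ p := fun h => hne (by rw [hq, h])
      have hconf : pvConflict (pvBChars corr ((c, p) :: rest)) := by
        refine Or.inl ⟨c, q, p, hqp, ?_, ?_⟩
        · exact (mem_pvBChars _ _ _).mpr (Or.inl hq_mem)
        · exact (mem_pvBChars _ _ _).mpr (Or.inr (List.mem_cons_self))
      refine ⟨fun r hr => ?_, fun _ => hconf⟩
      rw [if_pos ⟨hs, hne⟩] at hr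
      exact absurd hr (by simp)
    · rw [if_neg h1]
      have hget1 : d1.get? c = none ∨ d1.get? c = some p := by
        rcases h : d1.get? c with _ | q
        · exact Or.inl rfl
        · right
          by_contra hne
          exact h1 ⟨by simp [h], by rw [h]; exact hne⟩
      by_cases h2 : (d2.get? p).isSome ∧ d2.get? p ≠ some c
      · -- A fails on the backward map: two pairs with the same plain char
        obtain ⟨hs2, hne2⟩ := h2
        obtain ⟨c', hc'⟩ := Option.isSome_iff_exists.mp hs2
        have hc'_mem : (c', p) ∈ corr := (hinv.2 c' p).mp hc'
        have hcc : c' ≠ c := fun h => hne2 (by rw [hc', h])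
        have hconf : pvConflict (pvBChars corr ((c, p) :: rest)) := by
          refine Or.inr ⟨p, c', c, hcc, ?_, ?_⟩
          · exact (mem_pvBChars _ _ _).mpr (Or.inl hc'_mem)
          · exact (mem_pvBChars _ _ _).mpr (Or.inr (List.mem_cons_self))
        refine ⟨fun r hr => ?_, fun _ => hconf⟩
        rw [if_pos ⟨hs2, hne2⟩] at hr
        exact absurd hr (by simp)
      · rw [if_neg h2]
        have hget2 : d2.get? p = none ∨ d2.get? p = some c := by
          rcases h : d2.get? p with _ | c'
          · exact Or.inl rfl
          · right
            by_contra hne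
            refine h2 ⟨by simp [h], by rw [h]; intro he; exact hne he⟩
        -- the invariant is preserved by the twin inserts / the set add
        have hinv' : pvInv (d1.insert c p) (d2.insert p c) (PySem.Set.add corr (c, p)) := by
          constructor
          · intro c' p'
            rw [PySem.Dict.get?_insert, PySem.Set.mem_add]
            by_cases hc : c' = c
            · subst hc
              rw [if_pos rfl]
              constructor
              · intro h; right; injection h with h; rw [h]
              · rintro (hmem | hpair)
                · have := (hinv.1 c' p').mpr hmem
                  rcases hget1 with hn | hp
                  · rw [hn] at this; exact absurd this (by simp)
                  · rw [hp] at this; injection this with h; rw [h]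
                · injection hpair with _ h; rw [h]
            · rw [if_neg hc, hinv.1 c' p']
              constructor
              · exact fun h => Or.inl h
              · rintro (hmem | hpair)
                · exact hmem
                · exact absurd (congrArg Prod.fst hpair) hc
          · intro c' p'
            rw [PySem.Dict.get?_insert, PySem.Set.mem_add]
            by_cases hp : p' = p
            · subst hp
              rw [if_pos rfl]
              constructor
              · intro h; right; injection h with h; rw [h]
              · rintro (hmem | hpair)
                · have := (hinv.2 c' p').mpr hmem
                  rcases hget2 with hn | hc
                  · rw [hn] at this; exact absurd this (by simp)
                  · rw [hc] at this; injection this with h; rw [h]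
                · injection hpair with h _; rw [h]
            · rw [if_neg hp, hinv.2 c' p']
              constructor
              · exact fun h => Or.inl h
              · rintro (hmem | hpair)
                · exact hmem
                · exact absurd (congrArg Prod.snd hpair) hp
        rw [hb]
        exact ih (d1.insert c p) (d2.insert p c) (PySem.Set.add corr (c, p)) hinv'

-- the word-level simulation
theorem pvAWords_sim (ws : List (List Char × List Char)) :
    ∀ d1 d2 corr, pvInv d1 d2 corr →
      (∀ r, pvAWords ws d1 d2 = some r → ∃ s, pvBWords ws corr = some s ∧ pvInv r.1 r.2 s) ∧
      (pvAWords ws d1 d2 = none →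
        pvBWords ws corr = none ∨ ∃ s, pvBWords ws corr = some s ∧ pvConflict s) := by
  induction ws with
  | nil =>
    intro d1 d2 corr hinv
    refine ⟨fun r hr => ⟨corr, rfl, ?_⟩, fun hr => by simp [pvAWords] at hr⟩
    simp [pvAWords] at hr
    simpa [← hr] using hinv
  | cons w rest ih =>
    obtain ⟨cw, pw⟩ := w
    intro d1 d2 corr hinv
    simp only [pvAWords, pvBWords]
    by_cases hlen : cw.length ≠ pw.length
    · rw [if_pos hlen, if_pos hlen]
      exact ⟨fun r hr => absurd hr (by simp), fun _ => Or.inl rfl⟩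
    · rw [if_neg hlen, if_neg hlen]
      have hchar := pvAChars_sim (cw.zip pw) d1 d2 corr hinv
      rcases hA : pvAChars (cw.zip pw) d1 d2 with _ | ⟨d1', d2'⟩
      · -- conflict already in the set; B carries on and keeps it
        have hconf := hchar.2 hA
        refine ⟨fun r hr => by simp at hr, fun _ => ?_⟩
        rcases hB : pvBWords rest (pvBChars corr (cw.zip pw)) with _ | s
        · exact Or.inl rfl
        · exact Or.inr ⟨s, rfl, pvConflict_mono (pvBWords_subset hB) hconf⟩
      · have hinv' := hchar.1 (d1', d2') hA
        exact ih d1' d2' (pvBChars corr (cw.zip pw)) hinv'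

-- final cardinality check of B, named for the proofs (definitionally the expression in the port)
def pvCardOK (s : PySem.Set (Char × Char)) : Bool :=
  let nF := PySem.Set.len (PySem.Set.ofList (s.map Prod.fst))
  let nS := PySem.Set.len (PySem.Set.ofList (s.map Prod.snd))
  PySem.Set.len s == nF && nF == nS

theorem pv_len_ofList_eq_iff {α : Type} [BEq α] [LawfulBEq α] [DecidableEq α] (xs : List α) :
    (PySem.Set.ofList xs).length = xs.length ↔ xs.Nodup := by
  constructor
  · intro h
    have hfin : (PySem.Set.ofList xs).toFinset = xs.toFinset := by
      apply Finset.ext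
      intro a
      simp [List.mem_toFinset, PySem.Set.mem_ofList]
    have hcard : xs.toFinset.card = xs.length := by
      rw [← hfin, List.toFinset_card_of_nodup (PySem.Set.nodup_ofList xs), h]
    rw [List.card_toFinset] at hcard
    exact List.dedup_eq_self.mp ((List.dedup_sublist xs).eq_of_length hcard)
  · intro h
    rw [PySem.Set.ofList_eq_self_of_nodup xs h]

theorem pvCardOK_iff (s : List (Char × Char)) (hs : s.Nodup) :
    pvCardOK s = true ↔ ¬ pvConflict s := by
  have key : pvCardOK s = true ↔ (s.map Prod.fst).Nodup ∧ (s.map Prod.snd).Nodup := by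
    simp only [pvCardOK, PySem.Set.len, Bool.and_eq_true, beq_iff_eq, Nat.cast_inj]
    constructor
    · rintro ⟨h1, h2⟩
      have hF : (PySem.Set.ofList (s.map Prod.fst)).length = (s.map Prod.fst).length := by
        rw [← h1, List.length_map]
      have hS : (PySem.Set.ofList (s.map Prod.snd)).length = (s.map Prod.snd).length := by
        rw [← h2, ← h1, List.length_map]
      exact ⟨(pv_len_ofList_eq_iff _).mp hF, (pv_len_ofList_eq_iff _).mp hS⟩
    · rintro ⟨hF, hS⟩
      rw [PySem.Set.ofList_eq_self_of_nodup _ hF, PySem.Set.ofList_eq_self_of_nodup _ hS,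
        List.length_map, List.length_map]
      exact ⟨rfl, rfl⟩
  rw [key]
  constructor
  · rintro ⟨hF, hS⟩ (⟨c, p, q, hpq, h1, h2⟩ | ⟨p, c, d, hcd, h1, h2⟩)
    · exact hpq (congrArg Prod.snd (List.inj_on_of_nodup_map hF h1 h2 rfl))
    · exact hcd (congrArg Prod.fst (List.inj_on_of_nodup_map hS h1 h2 rfl))
  · intro hnc
    constructor
    · refine List.Nodup.map_on ?_ hs
      intro x hx y hy hxy
      rcases Decidable.eq_or_ne x.2 y.2 with hsnd | hsnd
      · exact Prod.ext hxy hsnd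
      · exact absurd (Or.inl ⟨x.1, x.2, y.2, hsnd, by simpa using hx, by rw [hxy]; simpa using hy⟩) hnc
    · refine List.Nodup.map_on ?_ hs
      intro x hx y hy hxy
      rcases Decidable.eq_or_ne x.1 y.1 with hfst | hfst
      · exact Prod.ext hfst hxy
      · exact absurd (Or.inr ⟨x.2, x.1, y.1, hfst, by simpa using hx, by rw [hxy]; simpa using hy⟩) hnc

-- the pair-level simulation: A's loop equals B's loop followed by the cardinality check
theorem pvAPairs_sim (ps : List (String × String)) :
    ∀ d1 d2 corr, pvInv d1 d2 corr → corr.Nodup →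
      pvAPairs ps d1 d2 = (match pvBPairs ps corr with
                           | none => false
                           | some s => pvCardOK s) := by
  induction ps with
  | nil =>
    intro d1 d2 corr hinv hnod
    simp only [pvAPairs, pvBPairs]
    exact ((pvCardOK_iff corr hnod).mpr (pvInv_not_conflict hinv)).symm
  | cons q rest ih =>
    obtain ⟨ct, pt⟩ := q
    intro d1 d2 corr hinv hnod
    simp only [pvAPairs, pvBPairs]
    by_cases hlen : (PySem.Chars.split₀ ct.toList).length ≠ (PySem.Chars.split₀ pt.toList).length
    · rw [if_pos hlen, if_pos hlen]
    · rw [if_neg hlen, if_neg hlen]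
      have hword := pvAWords_sim ((PySem.Chars.split₀ ct.toList).zip (PySem.Chars.split₀ pt.toList)) d1 d2 corr hinv
      rcases hA : pvAWords ((PySem.Chars.split₀ ct.toList).zip (PySem.Chars.split₀ pt.toList)) d1 d2 with _ | ⟨d1', d2'⟩
      · rcases hword.2 hA with hB | ⟨s, hB, hconf⟩
        · rw [hB]
        · rw [hB]
          rcases hP : pvBPairs rest s with _ | sf
          · simp only [hP]
          · have hconf' := pvConflict_mono (pvBPairs_subset hP) hconf
            have hnods : s.Nodup := pvBWords_nodup hB hnod
            have hnodf : sf.Nodup := pvBPairs_nodup hP hnods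
            have hfalse : pvCardOK sf = false := by
              cases h : pvCardOK sf with
              | false => rfl
              | true => exact absurd hconf' ((pvCardOK_iff sf hnodf).mp h)
            simp only [hP]
            simpa using hfalse.symm
      · obtain ⟨s, hB, hinv'⟩ := hword.1 (d1', d2') hA
        rw [hB]
        have := ih d1' d2' s hinv' (pvBWords_nodup hB hnod)
        exact this

-- ===== VERDICT (by name: the statement is the Claim_ definition above) =====
theorem consistent_substitution_spec : Claim_equal_consistent_substitution := by
  intro pairs _
  unfold Spec_consistent_substitution consistent_substitution consistent_substitution_alt
  have hinv : pvInv PySem.Dict.empty PySem.Dict.empty PySem.Set.empty := by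
    constructor <;> intro c p <;> simp [PySem.Dict.get?_empty, PySem.Set.empty]
  rw [pvAPairs_sim pairs PySem.Dict.empty PySem.Dict.empty PySem.Set.empty hinv List.nodup_nil]
  rcases pvBPairs pairs PySem.Set.empty with _ | s
  · rfl
  · rfl
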